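-- pv_equiv track=rewrite | github.com/jcolinpatrick/kryptos | scripts/yar/e_yar_nonperiodic.py | progressive_beau_dec
-- ===== SOURCE A (Python) =====
-- AZ = "ABCDEFGHIJKLMNOPQRSTUVWXYZ"
--
-- def _idx(alpha: str):
--     """Build char->index lookup for an alphabet."""
--     return {c: i for i, c in enumerate(alpha)}
--
-- def progressive_beau_dec(ct: str, key: str, shift: int, alpha: str = AZ) -> str:
--     aidx = _idx(alpha)
--     n = len(alpha)
--     klen = len(key)
--     kv = [aidx[c] for c in key]
--     pt = []
--     for i, c in enumerate(ct):
--         cycle = i // klen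
--         k = (kv[i % klen] + cycle * shift) % n
--         pt.append(alpha[(k - aidx[c]) % n])
--     return "".join(pt)
-- ===== SOURCE B (Python) =====
-- AZ = "ABCDEFGHIJKLMNOPQRSTUVWXYZ"
--
-- def progressive_beau_dec(ct: str, key: str, shift: int, alpha: str = AZ) -> str:
--     aidx = {c: i for i, c in enumerate(alpha)}
--     n = len(alpha)
--     out = []
--     base = 0
--     while ct:
--         chunk, ct = ct[:len(key)], ct[len(key):]
--         for kc, c in zip(key, chunk):
--             out.append(alpha[(aidx[kc] + base - aidx[c]) % n])
--         base += shift
--     return "".join(out)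
-- ===== Notes on version B (the rewrite author's own statement) =====
-- stated objective: alternative
-- what changed: B walks the ciphertext cycle-by-cycle, slicing a key-length chunk per pass and carrying one running base offset incremented by shift each cycle, instead of A's flat pass computing i//klen, i%klen and a list index per character (fewer per-character arithmetic operations).
import Mathlib
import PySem

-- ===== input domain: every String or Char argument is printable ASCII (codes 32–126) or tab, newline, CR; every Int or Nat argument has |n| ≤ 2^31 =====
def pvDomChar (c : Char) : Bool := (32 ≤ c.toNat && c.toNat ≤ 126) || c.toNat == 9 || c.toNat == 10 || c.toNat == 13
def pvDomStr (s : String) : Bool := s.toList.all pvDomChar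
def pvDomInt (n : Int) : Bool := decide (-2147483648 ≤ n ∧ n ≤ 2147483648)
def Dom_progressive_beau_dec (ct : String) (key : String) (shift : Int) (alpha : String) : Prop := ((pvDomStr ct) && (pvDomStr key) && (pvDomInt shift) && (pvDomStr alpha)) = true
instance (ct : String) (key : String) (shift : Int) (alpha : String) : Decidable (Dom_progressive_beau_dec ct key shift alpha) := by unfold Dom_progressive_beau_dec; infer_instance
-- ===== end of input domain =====

-- B iterates cycle-by-cycle (chunking ct by the key length, one running base offset that grows
-- by `shift` each cycle) instead of A's per-character i//klen, i%klen index arithmetic; objective: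
-- alternative decomposition, same cost.

-- ===== PORT A =====
-- shared helper: the dict comprehension {c: i for i, c in enumerate(alpha)} (A's _idx; B has the same line)
def pbdIdx (alpha : List Char) : PySem.Dict Char Int :=
  (PySem.List.enumerate alpha).foldl (fun d p => d.insert p.2 p.1) PySem.Dict.empty

def progressive_beau_dec (ct : String) (key : String) (shift : Int) (alpha : String) : String :=
  let aidx := pbdIdx alpha.toList
  let n : Int := (alpha.toList.length : Int)
  let klen : Int := (key.toList.length : Int)
  -- aidx[c]: KeyError (none) is excluded by Pre_, so the getD default is never returned inside Pre_
  let kv : List Int := key.toList.map (fun c => aidx.getD c 0)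
  let pt : List Char := (PySem.List.enumerate ct.toList).foldl
    (fun acc p =>
      let cycle := PySem.Int.floordiv p.1 klen
      let k := PySem.Int.mod (PySem.List.pyGetD kv (PySem.Int.mod p.1 klen) 0 + cycle * shift) n
      acc ++ [PySem.List.pyGetD alpha.toList (PySem.Int.mod (k - aidx.getD p.2 0) n) ' ']) []
  String.mk pt

-- ===== PORT B =====
-- B's while-loop: each pass slices one chunk ct[:len(key)] / ct[len(key):], zips it with the key,
-- then base += shift.  Python B diverges when key = "" and ct ≠ "" (outside Pre_); the key.isEmpty
-- guard only makes the recursion total there.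
def pbdAltGo (alpha : List Char) (n : Int) (aidx : PySem.Dict Char Int) (key : List Char)
    (shift : Int) (base : Int) (ct : List Char) : List Char :=
  if ct.isEmpty then []
  else if key.isEmpty then []
  else
    (key.zip (ct.take key.length)).map
      (fun p => PySem.List.pyGetD alpha (PySem.Int.mod (aidx.getD p.1 0 + base - aidx.getD p.2 0) n) ' ')
    ++ pbdAltGo alpha n aidx key shift (base + shift) (ct.drop key.length)
termination_by ct.length
decreasing_by
  simp only [List.length_drop]
  rename_i h1 h2
  simp only [List.isEmpty_iff] at h1 h2
  have : 0 < key.length := List.length_pos_iff.mpr h2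
  have : 0 < ct.length := List.length_pos_iff.mpr h1
  omega

def progressive_beau_dec_alt (ct : String) (key : String) (shift : Int) (alpha : String) : String :=
  let aidx := pbdIdx alpha.toList
  let n : Int := (alpha.toList.length : Int)
  String.mk (pbdAltGo alpha.toList n aidx key.toList shift 0 ct.toList)

-- ===== PRECONDITION & SPEC =====
-- Pre_: exactly where Python A returns: every char of key and of ct is in alpha (else KeyError),
-- and a non-empty ct needs a non-empty key (else ZeroDivisionError from i % 0).
def Pre_progressive_beau_dec (ct : String) (key : String) (shift : Int) (alpha : String) : Prop :=
  (key.toList.all (fun c => alpha.toList.contains c)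
   && ct.toList.all (fun c => alpha.toList.contains c)
   && (ct.toList.isEmpty || !key.toList.isEmpty)) = true
instance (ct : String) (key : String) (shift : Int) (alpha : String) : Decidable (Pre_progressive_beau_dec ct key shift alpha) := by unfold Pre_progressive_beau_dec; infer_instance

def pvWitness_progressive_beau_dec : String × String × Int × String := ("CAB", "AB", 1, "ABC")

def Spec_progressive_beau_dec (ct : String) (key : String) (shift : Int) (alpha : String) (out : String) : Prop := out = progressive_beau_dec_alt ct key shift alpha
instance (ct : String) (key : String) (shift : Int) (alpha : String) (out : String) : Decidable (Spec_progressive_beau_dec ct key shift alpha out) := by unfold Spec_progressive_beau_dec; infer_instance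

-- ===== CLAIM (what is proved, stated in full; the proofs are below) =====
def Claim_equal_progressive_beau_dec : Prop := ∀ (ct : String) (key : String) (shift : Int) (alpha : String), Dom_progressive_beau_dec ct key shift alpha → Pre_progressive_beau_dec ct key shift alpha → Spec_progressive_beau_dec ct key shift alpha (progressive_beau_dec ct key shift alpha)


-- ===== LEMMAS AND PROOFS =====

theorem pbd_mapIdx_congr {α β : Type} (l : List α) (f g : Nat → α → β)
    (h : ∀ j (hj : j < l.length), f j l[j] = g j l[j]) : l.mapIdx f = l.mapIdx g := by
  apply List.ext_getElem
  · simp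
  · intro i h1 h2
    simp only [List.getElem_mapIdx]
    exact h i (by simpa using h1)

-- mod-of-mod collapse for Python mod, positive modulus
theorem pbd_modmod (x y n : Int) (hn : 0 < n) :
    PySem.Int.mod (PySem.Int.mod x n - y) n = PySem.Int.mod (x - y) n := by
  rw [PySem.Int.mod_eq_emod_of_pos hn, PySem.Int.mod_eq_emod_of_pos hn,
      PySem.Int.mod_eq_emod_of_pos hn,
      Int.sub_emod (x % n) y n, Int.emod_emod_of_dvd x dvd_rfl, ← Int.sub_emod]

-- enumerate-map as mapIdx
theorem pbd_enum_map {α β : Type} (h : Int × α → β) :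
    ∀ (L : List α) (s : Nat), (PySem.List.enumerate L (s : Int)).map h
      = L.mapIdx (fun j c => h (((s + j : Nat) : Int), c)) := by
  intro L
  induction L with
  | nil => intro s; simp [PySem.List.enumerate_nil]
  | cons x xs ih =>
    intro s
    rw [PySem.List.enumerate_cons, List.map_cons, List.mapIdx_cons]
    have : ((s : Int) + 1) = ((s + 1 : Nat) : Int) := by push_cast; ring
    rw [this, ih (s + 1)]
    simp only [Nat.add_zero]
    congr 1
    apply pbd_mapIdx_congr
    intro j hj
    congr 2
    omega

-- the per-index value both ports compute (B-normal form)
def pbdF (alpha : List Char) (n : Int) (aidx : PySem.Dict Char Int) (kv : List Int)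
    (klen : Nat) (shift base : Int) (j : Nat) (c : Char) : Char :=
  PySem.List.pyGetD alpha
    (PySem.Int.mod (kv.getD (j % klen) 0 + (base + (j / klen : Nat) * shift) - aidx.getD c 0) n) ' '

theorem pbd_zip_map {β : Type} (g : Char × Char → β) :
    ∀ (key chunk : List Char), chunk.length ≤ key.length →
      (key.zip chunk).map g = chunk.mapIdx (fun j c => g (key.getD j ' ', c)) := by
  intro key
  induction key with
  | nil =>
    intro chunk h
    have : chunk = [] := List.eq_nil_of_length_eq_zero (Nat.le_zero.mp (by simpa using h))
    simp [this]
  | cons k ks ih =>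
    intro chunk h
    cases chunk with
    | nil => simp
    | cons c cs =>
      simp only [List.zip_cons_cons, List.map_cons, List.mapIdx_cons]
      rw [ih cs (by simpa using h)]
      rfl

theorem pbd_go_eq (alpha : List Char) (n : Int) (aidx : PySem.Dict Char Int) (key : List Char)
    (shift : Int) (hk : key ≠ []) (kv : List Int) (hkv : kv = key.map (fun c => aidx.getD c 0))
    (L : List Char) (base : Int) :
      pbdAltGo alpha n aidx key shift base L = L.mapIdx (pbdF alpha n aidx kv key.length shift base) := by
    rw [pbdAltGo]
    by_cases hL : L = []
    · simp [hL]
    · have hkl : 0 < key.length := List.length_pos_iff.mpr hk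
      simp only [List.isEmpty_iff, hL, hk, if_false]
      -- chunk part
      have hchunk : (key.zip (L.take key.length)).map
          (fun p => PySem.List.pyGetD alpha (PySem.Int.mod (aidx.getD p.1 0 + base - aidx.getD p.2 0) n) ' ')
          = (L.take key.length).mapIdx (pbdF alpha n aidx kv key.length shift base) := by
        rw [pbd_zip_map _ key (L.take key.length) (by simp)]
        apply pbd_mapIdx_congr
        intro j hj
        have hjk : j < key.length := by simp at hj; omega
        unfold pbdF
        have h1 : j % key.length = j := Nat.mod_eq_of_lt hjk
        have h2 : j / key.length = 0 := Nat.div_eq_of_lt hjk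
        rw [h1, h2, hkv]
        have hg : (key.map (fun c => aidx.getD c 0)).getD j 0 = aidx.getD (key.getD j ' ') 0 := by
          simp [List.getD, List.getElem?_map, List.getElem?_eq_getElem hjk]
        rw [hg]
        norm_num
      rw [hchunk, pbd_go_eq alpha n aidx key shift hk kv hkv (L.drop key.length) (base + shift)]
      -- reassemble via mapIdx_append
      conv_rhs => rw [show L = L.take key.length ++ L.drop key.length from (List.take_append_drop _ _).symm]
      rw [List.mapIdx_append]
      congr 1
      apply pbd_mapIdx_congr
      intro j hj
      by_cases hlen : key.length ≤ L.length
      · have ht : (L.take key.length).length = key.length := by simp; omega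
        rw [ht]
        unfold pbdF
        have h1 : (j + key.length) % key.length = j % key.length := Nat.add_mod_right j key.length
        have h2 : (j + key.length) / key.length = j / key.length + 1 := by
          rw [Nat.add_div_right _ hkl]
        rw [h1, h2]
        congr 2
        push_cast
        ring
      · exfalso
        have : L.drop key.length = [] := List.drop_eq_nil_of_le (by omega)
        rw [this] at hj
        simp at hj
termination_by L.length
decreasing_by
  have h1 : 0 < key.length := List.length_pos_iff.mpr hk
  have h2 : 0 < L.length := List.length_pos_iff.mpr hL
  simp only [List.length_drop]
  omega

-- A's foldl-append loop as a map over enumerate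
theorem pbd_foldl_append {α β : Type} (g : α → β) :
    ∀ (xs : List α) (acc : List β), xs.foldl (fun a x => a ++ [g x]) acc = acc ++ xs.map g := by
  intro xs
  induction xs with
  | nil => simp
  | cons x xs ih => intro acc; simp [List.foldl_cons, ih, List.append_assoc]

theorem progressive_beau_dec_spec : Claim_equal_progressive_beau_dec := by
  intro ct key shift alpha _hdom hpre
  unfold Spec_progressive_beau_dec
  unfold progressive_beau_dec progressive_beau_dec_alt
  simp only
  congr 1
  by_cases hct : ct.toList = []
  · simp [hct, pbdAltGo, PySem.List.enumerate_nil]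
  · unfold Pre_progressive_beau_dec at hpre
    simp only [Bool.and_eq_true, List.all_eq_true, List.contains_eq_mem, decide_eq_true_eq,
      Bool.or_eq_true, List.isEmpty_iff, Bool.not_eq_true', List.isEmpty_eq_false_iff] at hpre
    obtain ⟨⟨hkey, hctm⟩, hor⟩ := hpre
    have hk : key.toList ≠ [] := by
      rcases hor with h | h
      · exact absurd h hct
      · exact h
    have hkl : 0 < key.toList.length := List.length_pos_iff.mpr hk
    have hal : alpha.toList ≠ [] := by
      obtain ⟨c, hc⟩ := List.exists_mem_of_ne_nil _ hct
      exact List.ne_nil_of_mem (hctm c hc)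
    have hn : 0 < (alpha.toList.length : Int) := by
      have := List.length_pos_iff.mpr hal; exact_mod_cast this
    -- A side
    rw [pbd_foldl_append, List.nil_append]
    have := pbd_enum_map (α := Char)
      (fun p => PySem.List.pyGetD alpha.toList
        (PySem.Int.mod (PySem.Int.mod
          (PySem.List.pyGetD (key.toList.map (fun c => (pbdIdx alpha.toList).getD c 0))
            (PySem.Int.mod p.1 (key.toList.length : Int)) 0
          + PySem.Int.floordiv p.1 (key.toList.length : Int) * shift) (alpha.toList.length : Int)
          - (pbdIdx alpha.toList).getD p.2 0) (alpha.toList.length : Int)) ' ')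
      ct.toList 0
    simp only [Nat.cast_zero, Nat.zero_add] at this
    rw [this]
    -- B side
    rw [pbd_go_eq alpha.toList (alpha.toList.length : Int) (pbdIdx alpha.toList) key.toList shift hk
      (key.toList.map (fun c => (pbdIdx alpha.toList).getD c 0)) rfl ct.toList 0]
    apply pbd_mapIdx_congr
    intro j hj
    unfold pbdF
    rw [PySem.Int.floordiv_natCast, PySem.Int.mod_natCast, PySem.List.pyGetD_natCast]
    rw [pbd_modmod _ _ _ hn]
    norm_num
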